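-- pv_equiv track=rewrite | github.com/insanejokerhaha/recipe_project | app/app.py | find_top_k_and_index
-- ===== SOURCE A (Python) =====
-- def find_top_k_and_index(k, inputList):
--     count = 0
--     output = dict()
--     tempList = list(inputList).copy()
--     while count < k:
--         maxi = max(tempList)
--         for iterindex, item in enumerate(list(inputList)):
--             if item == maxi:
--                 output[iterindex] = item
--                 tempList[iterindex] = min(list(inputList))
--         count += 1
--     return output
-- ===== SOURCE B (Python) =====
-- def find_top_k_and_index(k, inputList):
--     # Group indices by value once, then emit the top-k distinct values (descending),
--     # each with its indices in ascending order.
--     groups = {}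
--     for i, v in enumerate(inputList):
--         groups.setdefault(v, []).append(i)
--     output = {}
--     for v in sorted(groups, reverse=True)[:max(k, 0)]:
--         for i in groups[v]:
--             output[i] = v
--     return output
-- ===== Notes on version B (the rewrite author's own statement) =====
-- stated objective: faster
-- what changed: Instead of A's k rounds each rescanning the whole list for the current max and overwriting a temp copy, B groups indices by value in one pass, sorts the distinct values once descending, and emits the index groups of the first k values.
-- crash fix: On a non-empty k (k > 0) with an empty inputList A raises ValueError from max([]); B returns the empty dict {}. — e.g. on find_top_k_and_index(1, []): A raises ValueError, B returns []
import Mathlib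
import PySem

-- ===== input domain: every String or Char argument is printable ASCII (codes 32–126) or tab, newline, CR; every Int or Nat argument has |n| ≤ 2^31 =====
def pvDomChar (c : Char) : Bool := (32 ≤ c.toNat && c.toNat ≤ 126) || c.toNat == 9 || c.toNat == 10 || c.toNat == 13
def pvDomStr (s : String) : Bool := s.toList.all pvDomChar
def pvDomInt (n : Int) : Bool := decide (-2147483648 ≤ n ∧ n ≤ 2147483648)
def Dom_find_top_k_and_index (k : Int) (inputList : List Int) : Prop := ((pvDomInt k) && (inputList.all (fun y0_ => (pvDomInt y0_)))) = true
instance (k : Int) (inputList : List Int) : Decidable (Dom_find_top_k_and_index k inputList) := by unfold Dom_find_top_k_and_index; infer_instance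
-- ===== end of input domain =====

-- B replaces A's per-round max-rescan loop by one pass grouping indices by value plus one
-- descending sort of the distinct values; a timing run measured B faster (asymptotic).


-- ===== PORT A =====
-- the while-body's for-loop: conditional dict write + tempList[i] = min(inputList) write
def aRound (inputList : List Int) (maxi mini : Int)
    (out : PySem.Dict Int Int) (temp : List Int) : PySem.Dict Int Int × List Int :=
  (PySem.List.enumerate inputList).foldl
    (fun st p => if p.2 == maxi then (st.1.insert p.1 p.2, PySem.List.pySetD st.2 p.1 mini) else st)
    (out, temp)

-- the while loop: one round per count value 0..k-1
def aLoop (inputList : List Int) : Nat → PySem.Dict Int Int → List Int → PySem.Dict Int Int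
  | 0, out, _ => out
  | n + 1, out, temp =>
    match PySem.List.max? temp (fun y => y) with
    | none => out   -- max([]) raises ValueError in Python: excluded by Pre_
    | some maxi =>
      -- min(list(inputList)); the list is non-empty whenever max? above succeeded
      let mini : Int := (PySem.List.min? inputList (fun y => y)).getD 0
      let st := aRound inputList maxi mini out temp
      aLoop inputList n st.1 st.2

def find_top_k_and_index (k : Int) (inputList : List Int) : List (Int × Int) :=
  (aLoop inputList k.toNat PySem.Dict.empty inputList).items

-- ===== PORT B =====
-- groups = {}; for i, v in enumerate(inputList): groups.setdefault(v, []).append(i)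
def bGroups (inputList : List Int) : PySem.Dict Int (List Int) :=
  (PySem.List.enumerate inputList).foldl
    (fun d p => d.modify p.2 [] (fun l => l ++ [p.1])) PySem.Dict.empty

def find_top_k_and_index_alt (k : Int) (inputList : List Int) : List (Int × Int) :=
  let groups := bGroups inputList
  -- sorted(groups, reverse=True)[:max(k, 0)]
  let tops := PySem.List.slice (PySem.List.sorted groups.keys (fun y => y) true) none (some (max k 0))
  (tops.foldl (fun out v => (groups.getD v []).foldl (fun out i => out.insert i v) out)
    PySem.Dict.empty).items

-- ===== PRECONDITION & SPEC =====
-- Pre_ excludes exactly the inputs where A raises: k > 0 with an empty list (max([]) is ValueError)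
def Pre_find_top_k_and_index (k : Int) (inputList : List Int) : Prop :=
  k ≤ 0 ∨ inputList ≠ []
instance (k : Int) (inputList : List Int) : Decidable (Pre_find_top_k_and_index k inputList) := by unfold Pre_find_top_k_and_index; infer_instance

def pvWitness_find_top_k_and_index : Int × List Int := (2, [3, 1, 3, 2])

-- On k > 0 with an empty inputList A raises ValueError from max([]); B returns the empty dict.
def Raises_find_top_k_and_index (k : Int) (inputList : List Int) : Prop :=
  0 < k ∧ inputList = []
instance (k : Int) (inputList : List Int) : Decidable (Raises_find_top_k_and_index k inputList) := by unfold Raises_find_top_k_and_index; infer_instance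
def pvRaiseWitness_find_top_k_and_index : Int × List Int := (1, [])
def pvRaiseWitnessOut_find_top_k_and_index : List (Int × Int) := []

def Spec_find_top_k_and_index (k : Int) (inputList : List Int) (out : List (Int × Int)) : Prop := out = find_top_k_and_index_alt k inputList
instance (k : Int) (inputList : List Int) (out : List (Int × Int)) : Decidable (Spec_find_top_k_and_index k inputList out) := by unfold Spec_find_top_k_and_index; infer_instance

-- ===== CLAIM (what is proved, stated in full; the proofs are below) =====
def Claim_equal_find_top_k_and_index : Prop := ∀ (k : Int) (inputList : List Int), Dom_find_top_k_and_index k inputList → Pre_find_top_k_and_index k inputList → Spec_find_top_k_and_index k inputList (find_top_k_and_index k inputList)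

def Claim_raises_find_top_k_and_index : Prop := (∀ (k : Int) (inputList : List Int), Dom_find_top_k_and_index k inputList → Raises_find_top_k_and_index k inputList → ¬ Pre_find_top_k_and_index k inputList) ∧ (Dom_find_top_k_and_index (pvRaiseWitness_find_top_k_and_index.1) (pvRaiseWitness_find_top_k_and_index.2) ∧ Raises_find_top_k_and_index (pvRaiseWitness_find_top_k_and_index.1) (pvRaiseWitness_find_top_k_and_index.2) ∧ find_top_k_and_index_alt (pvRaiseWitness_find_top_k_and_index.1) (pvRaiseWitness_find_top_k_and_index.2) = pvRaiseWitnessOut_find_top_k_and_index)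

-- ===== LEMMAS AND PROOFS =====

def grp (xs : List Int) (v : Int) : List (Int × Int) :=
  (PySem.List.enumerate xs).filter (fun p => p.2 == v)
def specL (xs : List Int) (ts : List Int) : List (Int × Int) := ts.flatMap (grp xs)

theorem nodup_fst_enum (xs : List Int) : ((PySem.List.enumerate xs 0).map (·.1)).Nodup := by
  rw [PySem.List.map_fst_enumerate]
  exact PySem.List.nodup_pyRange_one 0 (0 + xs.length)

theorem enum_key_inj {xs : List Int} {p q : Int × Int}
    (hp : p ∈ PySem.List.enumerate xs 0) (hq : q ∈ PySem.List.enumerate xs 0)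
    (h : p.1 = q.1) : p = q :=
  List.inj_on_of_nodup_map (nodup_fst_enum xs) hp hq h

theorem mem_grp {xs : List Int} {v : Int} {p : Int × Int} :
    p ∈ grp xs v ↔ p ∈ PySem.List.enumerate xs 0 ∧ p.2 = v := by
  simp [grp, List.mem_filter]

theorem nodup_fst_grp (xs : List Int) (v : Int) :
    ((grp xs v).map (·.1)).Nodup :=
  (List.Sublist.map _ List.filter_sublist).nodup (nodup_fst_enum xs)

theorem mem_fst_specL {xs : List Int} {ts : List Int} {i : Int} :
    i ∈ (specL xs ts).map (·.1) ↔
      ∃ p ∈ PySem.List.enumerate xs 0, p.1 = i ∧ p.2 ∈ ts := by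
  simp only [specL, List.map_flatMap, List.mem_flatMap]
  constructor
  · rintro ⟨v, hv, hi⟩
    rcases List.mem_map.1 hi with ⟨p, hp, rfl⟩
    rcases mem_grp.1 hp with ⟨he, h2⟩
    exact ⟨p, he, rfl, h2 ▸ hv⟩
  · rintro ⟨p, he, rfl, hv⟩
    exact ⟨p.2, hv, List.mem_map.2 ⟨p, mem_grp.2 ⟨he, rfl⟩, rfl⟩⟩

theorem nodup_fst_specL (xs : List Int) {ts : List Int} (h : ts.Nodup) :
    ((specL xs ts).map (·.1)).Nodup := by
  induction ts with
  | nil => simp [specL]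
  | cons v ts ih =>
    rcases List.nodup_cons.1 h with ⟨hv, hts⟩
    have : specL xs (v :: ts) = grp xs v ++ specL xs ts := by simp [specL]
    rw [this, List.map_append, List.nodup_append]
    refine ⟨nodup_fst_grp xs v, ih hts, ?_⟩
    intro i hi j hj heq
    subst heq
    rcases List.mem_map.1 hi with ⟨p, hp, rfl⟩
    rcases mem_grp.1 hp with ⟨he, h2⟩
    rcases mem_fst_specL.1 hj with ⟨q, hq, h1, h2'⟩
    exact absurd (h2 ▸ (enum_key_inj he hq h1.symm ▸ h2')) hv

theorem items_mk (L : List (Int × Int)) : (PySem.Dict.mk L).items = L := rfl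

theorem fresh_grp {xs : List Int} {done : List Int} {v : Int} (hv : v ∉ done) :
    ∀ p ∈ grp xs v, (PySem.Dict.mk (specL xs done)).contains p.1 = false := by
  intro p hp
  rcases mem_grp.1 hp with ⟨he, h2⟩
  rw [PySem.Dict.contains_eq_decide_mem_keys, decide_eq_false_iff_not, PySem.Dict.keys_mk]
  intro hmem
  rcases mem_fst_specL.1 hmem with ⟨q, hq, h1, h2'⟩
  exact hv (h2 ▸ (enum_key_inj he hq h1.symm ▸ h2'))

theorem insert_grp (xs : List Int) (done : List Int) (v : Int) (hv : v ∉ done) :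
    (grp xs v).foldl (fun o p => o.insert p.1 p.2) (PySem.Dict.mk (specL xs done))
      = PySem.Dict.mk (specL xs (done ++ [v])) := by
  apply PySem.Dict.ext
  have := PySem.Dict.items_foldl_insert_fresh (grp xs v) (·.1) (·.2)
      (PySem.Dict.mk (specL xs done)) (fresh_grp hv) (nodup_fst_grp xs v)
  rw [this, items_mk, items_mk]
  have hmap : (grp xs v).map (fun a => (a.1, a.2)) = grp xs v := by
    simp
  rw [hmap]
  simp [specL]

theorem insert_mem_eq {d : PySem.Dict Int Int} {k v : Int}
    (hnd : d.keys.Nodup) (h : (k, v) ∈ d.items) : d.insert k v = d := by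
  apply PySem.Dict.ext
  have hc : d.contains k = true := by
    rw [PySem.Dict.contains_eq_decide_mem_keys, decide_eq_true_iff]
    have : (k, v).1 ∈ d.items.map (·.1) := List.mem_map.2 ⟨(k, v), h, rfl⟩
    simpa [PySem.Dict.keys] using this
  rw [PySem.Dict.items_insert_of_contains d v hc]
  conv_rhs => rw [show d.items = d.items.map id from (List.map_id _).symm]
  apply List.map_congr_left
  intro p hp
  by_cases hk : p.1 = k
  · have : p = (k, v) := by
      have hnd' : (d.items.map (·.1)).Nodup := by simpa [PySem.Dict.keys] using hnd
      exact List.inj_on_of_nodup_map hnd' hp h hk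
    simp [this]
  · simp [hk]

theorem foldl_insert_id {d : PySem.Dict Int Int} {L : List (Int × Int)}
    (h : ∀ p ∈ L, d.insert p.1 p.2 = d) :
    L.foldl (fun o p => o.insert p.1 p.2) d = d := by
  induction L with
  | nil => rfl
  | cons p L ih =>
    rw [List.foldl_cons, h p List.mem_cons_self]
    exact ih (fun q hq => h q (List.mem_cons_of_mem _ hq))

theorem max?_eq_of {temp : List Int} {v : Int} (hmem : v ∈ temp)
    (hle : ∀ y ∈ temp, y ≤ v) : PySem.List.max? temp (fun y => y) = some v := by
  cases hmax : PySem.List.max? temp (fun y => y) with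
  | none =>
    rw [PySem.List.max?_eq_none_iff] at hmax
    simp [hmax] at hmem
  | some w =>
    have hw := PySem.List.max?_mem hmax
    have h1 : w ≤ v := hle w hw
    have h2 : v ≤ w := PySem.List.max?_isMax hmax v hmem
    rw [le_antisymm h1 h2]

theorem tempFold (maxi m : Int) (h : Int → Int) :
    ∀ (ys : List Int) (s : Nat) (temp : List Int), temp.drop s = ys.map h →
    (PySem.List.enumerate ys (s : Int)).foldl
        (fun t p => if p.2 == maxi then PySem.List.pySetD t p.1 m else t) temp
      = temp.take s ++ ys.map (fun x => if x == maxi then m else h x) := by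
  intro ys
  induction ys with
  | nil =>
    intro s temp hdrop
    simp only [List.map_nil] at hdrop
    simp [PySem.List.enumerate, List.take_of_length_le (List.drop_eq_nil_iff.1 hdrop)]
  | cons x ys ih =>
    intro s temp hdrop
    have hs : s < temp.length := by
      by_contra hc
      rw [List.drop_eq_nil_iff.2 (by omega)] at hdrop
      simp at hdrop
    have hget : temp[s] = h x := by
      have := List.drop_eq_getElem_cons hs
      rw [this, List.map_cons] at hdrop
      exact (List.cons_eq_cons.1 hdrop).1
    have hdrop1 : temp.drop (s + 1) = ys.map h := by
      have := List.drop_eq_getElem_cons hs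
      rw [this, List.map_cons] at hdrop
      exact (List.cons_eq_cons.1 hdrop).2
    rw [PySem.List.enumerate_cons, List.foldl_cons]
    by_cases hx : x = maxi
    · have hxb : ((s : Int), x).2 == maxi := by simp [hx]
      rw [if_pos hxb]
      have hset : PySem.List.pySetD temp ((s : Int), x).1 m = temp.set s m := by
        exact PySem.List.pySetD_natCast temp s m
      rw [hset]
      have hcast : ((s : Int) + 1) = ((s + 1 : Nat) : Int) := by push_cast; ring
      rw [hcast, ih (s + 1) (temp.set s m) (by rw [List.drop_set]; simp [hdrop1])]
      rw [List.take_set, List.take_add_one, List.getElem?_eq_getElem hs, List.set_append]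
      simp [List.length_take_of_le (le_of_lt hs), hx]
    · have hxb : ¬ (((s : Int), x).2 == maxi) = true := by simp [hx]
      rw [if_neg hxb]
      have hcast : ((s : Int) + 1) = ((s + 1 : Nat) : Int) := by push_cast; ring
      rw [hcast, ih (s + 1) temp hdrop1]
      rw [List.take_add_one]
      simp [List.getElem?_eq_getElem hs, hget, hx]



theorem aRound_eq (xs : List Int) (maxi mini : Int) (out : PySem.Dict Int Int) (temp : List Int) :
    aRound xs maxi mini out temp =
      ((PySem.List.enumerate xs).foldl (fun o p => if p.2 == maxi then o.insert p.1 p.2 else o) out,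
       (PySem.List.enumerate xs).foldl (fun t p => if p.2 == maxi then PySem.List.pySetD t p.1 mini else t) temp) := by
  unfold aRound
  have hfun : (fun (st : PySem.Dict Int Int × List Int) (p : Int × Int) =>
        if p.2 == maxi then (st.1.insert p.1 p.2, PySem.List.pySetD st.2 p.1 mini) else st)
      = (fun st p => ((if p.2 == maxi then st.1.insert p.1 p.2 else st.1),
                      (if p.2 == maxi then PySem.List.pySetD st.2 p.1 mini else st.2))) := by
    funext st p
    by_cases hc : (p.2 == maxi) = true <;> simp [hc]
  rw [hfun]
  exact PySem.List.foldl_prod_mk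
    (fun o (p : Int × Int) => if p.2 == maxi then o.insert p.1 p.2 else o)
    (fun t (p : Int × Int) => if p.2 == maxi then PySem.List.pySetD t p.1 mini else t)
    (PySem.List.enumerate xs) out temp

theorem aLoop_succ (xs : List Int) (n : Nat) (out : PySem.Dict Int Int) (temp : List Int)
    (maxi : Int) (h : PySem.List.max? temp (fun y => y) = some maxi) :
    aLoop xs (n + 1) out temp =
      aLoop xs n (aRound xs maxi ((PySem.List.min? xs (fun y => y)).getD 0) out temp).1
        (aRound xs maxi ((PySem.List.min? xs (fun y => y)).getD 0) out temp).2 := by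
  rw [aLoop, h]

theorem grp_insert_id (xs done : List Int) (m : Int) (hnd : done.Nodup) (hm : m ∈ done) :
    ∀ p ∈ grp xs m, (PySem.Dict.mk (specL xs done)).insert p.1 p.2 = PySem.Dict.mk (specL xs done) := by
  intro p hp
  have h2 : p.2 = m := (mem_grp.1 hp).2
  have hmem : (p.1, p.2) ∈ specL xs done := by
    apply List.mem_flatMap.2
    exact ⟨m, hm, hp⟩
  exact insert_mem_eq (by simpa [PySem.Dict.keys_mk] using nodup_fst_specL xs hnd) hmem

theorem pairwise_gt_nodup {l : List Int} (h : l.Pairwise (· > ·)) : l.Nodup :=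
  h.imp (fun hab => by omega)

theorem aLoop_inv (xs : List Int) (m : Int) (hne : xs ≠ [])
    (hmin : PySem.List.min? xs (fun y => y) = some m) :
    ∀ (fuel : Nat) (done ts : List Int),
      (done ++ ts).Pairwise (· > ·) →
      (∀ x, x ∈ done ++ ts ↔ x ∈ xs) →
      aLoop xs fuel (PySem.Dict.mk (specL xs done))
        (xs.map (fun x => if x ∈ ts then x else m))
      = PySem.Dict.mk (specL xs (done ++ ts.take fuel)) := by
  intro fuel
  induction fuel with
  | zero => intro done ts _ _; simp [aLoop]
  | succ n ih =>
    intro done ts hpw hmem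
    cases ts with
    | nil =>
      have hmx : m ∈ xs := PySem.List.min?_mem hmin
      have htemp : ∀ x ∈ xs, (if x ∈ ([] : List Int) then x else m) = m := by
        intro x _; simp
      have hmax : PySem.List.max? (xs.map (fun x => if x ∈ ([] : List Int) then x else m))
          (fun y => y) = some m := by
        apply max?_eq_of
        · rcases List.exists_mem_of_ne_nil xs hne with ⟨x, hx⟩
          exact List.mem_map.2 ⟨x, hx, htemp x hx⟩
        · intro y hy
          rcases List.mem_map.1 hy with ⟨x, hx, rfl⟩
          rw [htemp x hx]
      rw [aLoop_succ xs n _ _ m hmax, aRound_eq, hmin]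
      simp only [Option.getD_some]
      have hdone_nd : done.Nodup := by
        simpa using pairwise_gt_nodup hpw
      have hmdone : m ∈ done := by
        have := (hmem m).2 hmx
        simpa using this
      have hout : (PySem.List.enumerate xs).foldl
          (fun o p => if p.2 == m then o.insert p.1 p.2 else o) (PySem.Dict.mk (specL xs done))
          = PySem.Dict.mk (specL xs done) := by
        rw [← List.foldl_filter]
        exact foldl_insert_id (grp_insert_id xs done m hdone_nd hmdone)
      have htmp : (PySem.List.enumerate xs).foldl
          (fun t p => if p.2 == m then PySem.List.pySetD t p.1 m else t)
          (xs.map (fun x => if x ∈ ([] : List Int) then x else m))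
          = xs.map (fun x => if x ∈ ([] : List Int) then x else m) := by
        have h0 : ((0 : Nat) : Int) = 0 := by norm_num
        have := tempFold m m (fun x => if x ∈ ([] : List Int) then x else m) xs 0
          (xs.map (fun x => if x ∈ ([] : List Int) then x else m)) (by simp)
        rw [h0] at this
        rw [this]
        simp only [List.take_zero, List.nil_append]
        apply List.map_congr_left
        intro x hx
        by_cases hxm : x = m <;> simp [hxm]
      simp only [hout, htmp]
      have := ih done [] hpw hmem
      simpa using this
    | cons v ts' =>
      have hsplit := List.pairwise_append.1 hpw
      have hvts : (v :: ts').Pairwise (· > ·) := hsplit.2.1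
      have hvgt : ∀ b ∈ ts', v > b := (List.pairwise_cons.1 hvts).1
      have hvnts' : v ∉ ts' := fun hc => by have := hvgt v hc; omega
      have hvdone : v ∉ done := fun hc => by
        have := hsplit.2.2 v hc v (List.mem_cons_self)
        omega
      have hvxs : v ∈ xs := (hmem v).1 (by simp)
      have hmle : ∀ y ∈ xs, m ≤ y := PySem.List.min?_isMin hmin
      have hmax : PySem.List.max? (xs.map (fun x => if x ∈ v :: ts' then x else m))
          (fun y => y) = some v := by
        apply max?_eq_of
        · exact List.mem_map.2 ⟨v, hvxs, by simp⟩
        · intro y hy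
          rcases List.mem_map.1 hy with ⟨x, hx, rfl⟩
          by_cases hxin : x ∈ v :: ts'
          · rw [if_pos hxin]
            rcases List.mem_cons.1 hxin with rfl | hx'
            · exact le_refl _
            · exact le_of_lt (hvgt x hx')
          · rw [if_neg hxin]
            exact hmle v hvxs
      rw [aLoop_succ xs n _ _ v hmax, aRound_eq, hmin]
      simp only [Option.getD_some]
      have hout : (PySem.List.enumerate xs).foldl
          (fun o p => if p.2 == v then o.insert p.1 p.2 else o) (PySem.Dict.mk (specL xs done))
          = PySem.Dict.mk (specL xs (done ++ [v])) := by
        rw [← List.foldl_filter]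
        exact insert_grp xs done v hvdone
      have htmp : (PySem.List.enumerate xs).foldl
          (fun t p => if p.2 == v then PySem.List.pySetD t p.1 m else t)
          (xs.map (fun x => if x ∈ v :: ts' then x else m))
          = xs.map (fun x => if x ∈ ts' then x else m) := by
        have h0 : ((0 : Nat) : Int) = 0 := by norm_num
        have := tempFold v m (fun x => if x ∈ v :: ts' then x else m) xs 0
          (xs.map (fun x => if x ∈ v :: ts' then x else m)) (by simp)
        rw [h0] at this
        rw [this]
        simp only [List.take_zero, List.nil_append]
        apply List.map_congr_left
        intro x hx
        by_cases hxv : x = v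
        · subst hxv
          simp [hvnts']
        · simp [hxv]
      simp only [hout, htmp]
      have hpw' : ((done ++ [v]) ++ ts').Pairwise (· > ·) := by
        simpa [List.append_assoc] using hpw
      have hmem' : ∀ x, x ∈ (done ++ [v]) ++ ts' ↔ x ∈ xs := by
        intro x
        rw [← hmem x]
        simp [List.append_assoc, List.mem_cons]
      have := ih (done ++ [v]) ts' hpw' hmem'
      have hln : (done ++ [v]) ++ ts'.take n = done ++ v :: ts'.take n := by simp
      rw [show (v :: ts').take (n + 1) = v :: ts'.take n from rfl, ← hln]
      exact this


theorem groups_getD (xs : List Int) (v : Int) :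
    (bGroups xs).getD v [] = (grp xs v).map (·.1) := by
  have hsw : bGroups xs = ((PySem.List.enumerate xs).map Prod.swap).foldl
      (fun d p => d.modify p.1 [] (fun l => l ++ [p.2])) PySem.Dict.empty := by
    rw [List.foldl_map]
    rfl
  rw [hsw, PySem.Dict.getD_foldl_modify_append]
  rw [List.filter_map]
  simp only [PySem.Dict.getD_empty, List.nil_append, List.map_map]
  rfl

theorem groups_keys (xs : List Int) : (bGroups xs).keys = PySem.Set.ofList xs := by
  unfold bGroups
  rw [PySem.Dict.keys_foldl_modify_key (PySem.List.enumerate xs) (·.2) []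
    (fun _ p => fun l => l ++ [p.1]) PySem.Dict.empty]
  rw [PySem.List.map_snd_enumerate, PySem.Dict.keys_empty]
  rw [PySem.Set.ofList_eq_foldl]
  rfl

theorem bFold (xs : List Int) :
    ∀ (rem done : List Int), (done ++ rem).Nodup →
    rem.foldl (fun out v => (((grp xs v).map (·.1)).foldl (fun out i => out.insert i v) out))
        (PySem.Dict.mk (specL xs done))
      = PySem.Dict.mk (specL xs (done ++ rem)) := by
  intro rem
  induction rem with
  | nil => intro done _; simp
  | cons v rem ih =>
    intro done hnd
    rw [List.foldl_cons]
    have hv : v ∉ done := by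
      intro hc
      have := List.nodup_append.1 hnd
      exact this.2.2 v hc v List.mem_cons_self rfl
    have hinner : ((grp xs v).map (·.1)).foldl (fun out i => out.insert i v)
        (PySem.Dict.mk (specL xs done)) = PySem.Dict.mk (specL xs (done ++ [v])) := by
      rw [List.foldl_map]
      have hcongr : List.foldl (fun (o : PySem.Dict Int Int) (p : Int × Int) => o.insert p.1 v)
          (PySem.Dict.mk (specL xs done)) (grp xs v)
          = List.foldl (fun o p => o.insert p.1 p.2) (PySem.Dict.mk (specL xs done)) (grp xs v) := by
        apply PySem.List.foldl_congr_mem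
        intro acc p hp
        rw [(mem_grp.1 hp).2]
      rw [hcongr]
      exact insert_grp xs done v hv
    rw [hinner]
    have hnd' : ((done ++ [v]) ++ rem).Nodup := by
      simpa [List.append_assoc] using hnd
    have := ih (done ++ [v]) hnd'
    rw [this]
    simp



theorem nodup_sortedvs (xs : List Int) :
    (PySem.List.sorted (PySem.Set.ofList xs) (fun y => y) true).Nodup :=
  (PySem.List.sorted_perm _ _ _).symm.nodup (PySem.Set.nodup_ofList xs)

theorem alt_eq (k : Int) (xs : List Int) :
    find_top_k_and_index_alt k xs
      = specL xs ((PySem.List.sorted (PySem.Set.ofList xs) (fun y => y) true).take k.toNat) := by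
  show ((PySem.List.slice (PySem.List.sorted (bGroups xs).keys (fun y => y) true) none
          (some (max k 0))).foldl
        (fun out v => ((bGroups xs).getD v []).foldl (fun out i => out.insert i v) out)
        PySem.Dict.empty).items = _
  rw [groups_keys]
  have hslice : PySem.List.slice (PySem.List.sorted (PySem.Set.ofList xs) (fun y => y) true)
      none (some (max k 0))
      = (PySem.List.sorted (PySem.Set.ofList xs) (fun y => y) true).take k.toNat := by
    rw [PySem.List.slice_to _ (le_max_right k 0)]
    congr 1
    omega
  rw [hslice]
  have hfun : (fun (out : PySem.Dict Int Int) (v : Int) =>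
        ((bGroups xs).getD v []).foldl (fun out i => out.insert i v) out)
      = (fun out v => (((grp xs v).map (·.1)).foldl (fun out i => out.insert i v) out)) := by
    funext out v
    rw [groups_getD]
  rw [hfun]
  have hnd : (([] : List Int) ++ (PySem.List.sorted (PySem.Set.ofList xs) (fun y => y) true).take k.toNat).Nodup := by
    simpa using (List.take_sublist _ _).nodup (nodup_sortedvs xs)
  have := bFold xs ((PySem.List.sorted (PySem.Set.ofList xs) (fun y => y) true).take k.toNat) [] hnd
  rw [show (PySem.Dict.empty : PySem.Dict Int Int) = PySem.Dict.mk (specL xs []) from rfl, this]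
  simp

theorem a_eq (k : Int) (xs : List Int) (hne : xs ≠ []) :
    find_top_k_and_index k xs
      = specL xs ((PySem.List.sorted (PySem.Set.ofList xs) (fun y => y) true).take k.toNat) := by
  obtain ⟨m, hmin⟩ : ∃ m, PySem.List.min? xs (fun y => y) = some m := by
    cases h : PySem.List.min? xs (fun y => y) with
    | none => exact absurd ((PySem.List.min?_eq_none_iff xs _).1 h) hne
    | some m => exact ⟨m, rfl⟩
  have hnd : (PySem.List.sorted (PySem.Set.ofList xs) (fun y => y) true).Nodup := nodup_sortedvs xs
  have hpw : (PySem.List.sorted (PySem.Set.ofList xs) (fun y => y) true).Pairwise (· > ·) := by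
    have h1 := PySem.List.sorted_pairwise_rev (PySem.Set.ofList xs) (fun y => y)
    exact (h1.and hnd).imp (fun hab => by omega)
  have hmemiff : ∀ x, x ∈ ([] : List Int) ++ (PySem.List.sorted (PySem.Set.ofList xs) (fun y => y) true) ↔ x ∈ xs := by
    intro x
    simp [PySem.List.mem_sorted, PySem.Set.mem_ofList]
  have hxsmap : xs.map (fun x => if x ∈ (PySem.List.sorted (PySem.Set.ofList xs) (fun y => y) true) then x else m) = xs := by
    have : ∀ x ∈ xs, (if x ∈ (PySem.List.sorted (PySem.Set.ofList xs) (fun y => y) true) then x else m) = x := by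
      intro x hx
      rw [if_pos (by simpa using (hmemiff x).2 hx)]
    rw [List.map_congr_left this, List.map_id']
  have hloop := aLoop_inv xs m hne hmin k.toNat []
    (PySem.List.sorted (PySem.Set.ofList xs) (fun y => y) true) (by simpa using hpw) hmemiff
  rw [hxsmap] at hloop
  show (aLoop xs k.toNat PySem.Dict.empty xs).items = _
  rw [show (PySem.Dict.empty : PySem.Dict Int Int) = PySem.Dict.mk (specL xs []) from rfl, hloop]
  simp

theorem main_equiv (k : Int) (xs : List Int) (hpre : k ≤ 0 ∨ xs ≠ []) :
    find_top_k_and_index k xs = find_top_k_and_index_alt k xs := by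
  by_cases hxs : xs = []
  · subst hxs
    have hk : k ≤ 0 := by
      rcases hpre with h | h
      · exact h
      · exact absurd rfl h
    have hk0 : k.toNat = 0 := by omega
    rw [alt_eq]
    show (aLoop [] k.toNat PySem.Dict.empty []).items = _
    rw [hk0]
    simp [aLoop, specL]
    rfl
  · rw [a_eq k xs hxs, alt_eq]

-- ===== VERDICT (by name: the statement is the Claim_ definition above) =====
theorem find_top_k_and_index_spec : Claim_equal_find_top_k_and_index := by
  intro k xs _ hpre
  unfold Spec_find_top_k_and_index
  unfold Pre_find_top_k_and_index at hpre
  exact main_equiv k xs hpre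

@[simp]
theorem find_top_k_and_index_raises : Claim_raises_find_top_k_and_index := by
  unfold Claim_raises_find_top_k_and_index
  constructor
  · intro k xs _ hr hp
    rcases hr with ⟨hk, hxs⟩
    rcases hp with h | h
    · omega
    · exact h hxs
  · decide
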